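-- pv_equiv track=rewrite | github.com/bambish/ScanQLi | function.py | ConcatURLParams
-- ===== SOURCE A (Python) =====
-- def ConcatURLParams(url, params):
--     result = {url}
--     buffer = url + "?"
--     firstloop = True
--     for param in params:
--         if firstloop:
--             buffer += param
--             firstloop = False
--         else:
--             buffer += "&" + param
--         result.add(buffer)
--     return result
-- ===== SOURCE B (Python) =====
-- def ConcatURLParams(url, params):
--     params = list(params)
--     return {url} | {url + "?" + "&".join(params[:i]) for i in range(1, len(params) + 1)}
-- ===== Notes on version B (the rewrite author's own statement) =====
-- stated objective: simpler
-- what changed: Replaces the accumulator loop (running buffer + firstloop flag) with a one-line set comprehension that rebuilds each string independently as url + '?' + '&'.join(params[:i]).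
import Mathlib
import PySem

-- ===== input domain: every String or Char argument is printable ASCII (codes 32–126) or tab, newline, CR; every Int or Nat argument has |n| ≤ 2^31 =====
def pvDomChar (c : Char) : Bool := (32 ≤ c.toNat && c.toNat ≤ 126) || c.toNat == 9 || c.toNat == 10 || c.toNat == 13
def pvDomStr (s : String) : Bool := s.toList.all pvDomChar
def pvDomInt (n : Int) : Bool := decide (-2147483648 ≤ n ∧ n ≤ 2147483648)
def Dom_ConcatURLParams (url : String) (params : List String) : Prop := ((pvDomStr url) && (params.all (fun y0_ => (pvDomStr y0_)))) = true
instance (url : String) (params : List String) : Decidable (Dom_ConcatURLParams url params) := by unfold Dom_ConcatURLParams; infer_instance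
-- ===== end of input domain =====

-- B replaces A's running-buffer accumulator loop with direct reconstruction of each
-- string from a prefix slice (simpler decomposition, same cost).

-- ===== PORT A =====
-- one loop step of A: state = (result set, buffer, firstloop)
def pvStepA (st : PySem.Set String × String × Bool) (param : String) :
    PySem.Set String × String × Bool :=
  let (result, buffer, firstloop) := st
  let buffer' := if firstloop then buffer ++ param else buffer ++ ("&" ++ param)
  (PySem.Set.add result buffer', buffer', false)

def ConcatURLParams (url : String) (params : List String) : List String :=
  let st := params.foldl pvStepA (PySem.Set.ofList [url], url ++ "?", true)
  st.1

-- ===== PORT B =====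
-- '&'.join(xs)
def pvJoinAmp : List String → String
  | [] => ""
  | [x] => x
  | x :: xs => x ++ "&" ++ pvJoinAmp xs

def ConcatURLParams_alt (url : String) (params : List String) : List String :=
  PySem.Set.union (PySem.Set.ofList [url])
    ((List.range params.length).map
      (fun i => url ++ "?" ++ pvJoinAmp (params.take (i + 1))))

-- ===== PRECONDITION & SPEC =====
def Spec_ConcatURLParams (url : String) (params : List String) (out : List String) : Prop := out = ConcatURLParams_alt url params
instance (url : String) (params : List String) (out : List String) : Decidable (Spec_ConcatURLParams url params out) := by unfold Spec_ConcatURLParams; infer_instance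

-- ===== CLAIM (what is proved, stated in full; the proofs are below) =====
def Claim_equal_ConcatURLParams : Prop := ∀ (url : String) (params : List String), Dom_ConcatURLParams url params → Spec_ConcatURLParams url params (ConcatURLParams url params)

-- ===== LEMMAS AND PROOFS =====

-- the chain of buffer values A produces after the first iteration
def pvCands (buf : String) : List String → List String
  | [] => []
  | p :: ps => (buf ++ ("&" ++ p)) :: pvCands (buf ++ ("&" ++ p)) ps

-- last buffer value
def pvLastBuf (buf : String) : List String → String
  | [] => buf
  | p :: ps => pvLastBuf (buf ++ ("&" ++ p)) ps

theorem pvJoin_append (pre : List String) (q : String) (h : pre ≠ []) :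
    pvJoinAmp (pre ++ [q]) = pvJoinAmp pre ++ "&" ++ q := by
  induction pre with
  | nil => exact absurd rfl h
  | cons x xs ih =>
    cases xs with
    | nil => simp [pvJoinAmp]
    | cons y ys =>
      have : pvJoinAmp ((y :: ys) ++ [q]) = pvJoinAmp (y :: ys) ++ "&" ++ q :=
        ih (by simp)
      simp only [List.cons_append, pvJoinAmp] at this ⊢
      rw [this]
      simp [String.append_assoc]

theorem pvA_loop (ps : List String) : ∀ (s : PySem.Set String) (buf : String),
    ps.foldl pvStepA (s, buf, false) =
      ((pvCands buf ps).foldl PySem.Set.add s, pvLastBuf buf ps, false) := by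
  induction ps with
  | nil => intro s buf; simp [pvCands, pvLastBuf]
  | cons p ps ih =>
    intro s buf
    simp only [List.foldl_cons, pvStepA, pvCands, pvLastBuf]
    simp only [if_neg (by simp : ¬ (false = true))]
    exact ih _ _

theorem pvCands_eq (url : String) : ∀ (ps pre : List String), pre ≠ [] →
    pvCands (url ++ "?" ++ pvJoinAmp pre) ps =
      (List.range ps.length).map
        (fun i => url ++ "?" ++ pvJoinAmp (pre ++ ps.take (i + 1))) := by
  intro ps
  induction ps with
  | nil => intro pre _; simp [pvCands]
  | cons q qs ih =>
    intro pre hpre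
    have hb : url ++ "?" ++ pvJoinAmp pre ++ ("&" ++ q)
        = url ++ "?" ++ pvJoinAmp (pre ++ [q]) := by
      rw [pvJoin_append pre q hpre]
      simp [String.append_assoc]
    have ihq := ih (pre ++ [q]) (by simp)
    simp only [pvCands, hb, ihq, List.length_cons, List.range_succ_eq_map,
      List.map_cons, List.map_map]
    simp [Function.comp_def, List.append_assoc]

theorem ConcatURLParams_eq (url : String) (params : List String) :
    ConcatURLParams url params = ConcatURLParams_alt url params := by
  cases params with
  | nil =>
    simp [ConcatURLParams, ConcatURLParams_alt, PySem.Set.union, PySem.Set.update]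
  | cons p ps =>
    have hA : ConcatURLParams url (p :: ps)
        = (pvCands (url ++ "?" ++ p) ps).foldl PySem.Set.add
            (PySem.Set.add (PySem.Set.ofList [url]) (url ++ "?" ++ p)) := by
      simp only [ConcatURLParams, List.foldl_cons, pvStepA, if_true]
      rw [pvA_loop]
    have hmap : (List.range (p :: ps).length).map
          (fun i => url ++ "?" ++ pvJoinAmp ((p :: ps).take (i + 1)))
        = (url ++ "?" ++ p) :: pvCands (url ++ "?" ++ p) ps := by
      have hc := pvCands_eq url ps [p] (by simp)
      simp only [pvJoinAmp] at hc
      simp only [List.length_cons, List.range_succ_eq_map, List.map_cons, List.map_map]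
      rw [hc]
      simp [Function.comp_def, pvJoinAmp]
    simp only [ConcatURLParams_alt, hmap, hA, PySem.Set.union, PySem.Set.update,
      List.foldl_cons]

-- ===== VERDICT (by name: the statement is the Claim_ definition above) =====
theorem ConcatURLParams_spec : Claim_equal_ConcatURLParams := by
  intro url params _
  unfold Spec_ConcatURLParams
  exact ConcatURLParams_eq url params
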